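-- pv_equiv track=rewrite | github.com/pytorch/pytorch | aten/src/ATen/tensor_options_utils.py | check_if_factory_method
-- ===== SOURCE A (Python) =====
-- def check_if_factory_method(args):
--     for arg in args:
--         if 'type' not in arg:
--             return False
--
--     has_opt_TO_args = any(arg['type'] == 'c10::optional<ScalarType>' for arg in args) and \
--         any(arg['type'] == 'c10::optional<Layout>' for arg in args) and \
--         any(arg['type'] == 'c10::optional<Device>' for arg in args) and \
--         any(arg['type'] == 'c10::optional<bool>' for arg in args)
--
--     has_TO_args = any(arg['type'] == 'ScalarType' for arg in args) and \
--         any(arg['type'] == 'Layout' for arg in args) and \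
--         any(arg['type'] == 'Device' for arg in args) and \
--         any(arg['type'] == 'bool' for arg in args)
--
--     has_TO_arg = any('TensorOptions' in arg['type'] for arg in args)
--
--     return has_opt_TO_args or has_TO_args or has_TO_arg
-- ===== SOURCE B (Python) =====
-- _BIT = {
--     'c10::optional<ScalarType>': 1,
--     'c10::optional<Layout>': 2,
--     'c10::optional<Device>': 4,
--     'c10::optional<bool>': 8,
--     'ScalarType': 16,
--     'Layout': 32,
--     'Device': 64,
--     'bool': 128,
-- }
--
--
-- def check_if_factory_method(args):
--     mask = 0
--     for arg in args:
--         if 'type' not in arg: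
--             return False
--         t = arg['type']
--         mask |= _BIT.get(t, 0)
--         if 'TensorOptions' in t:
--             mask |= 256
--     return mask & 15 == 15 or mask & 240 == 240 or mask & 256 != 0
-- ===== Notes on version B (the rewrite author's own statement) =====
-- stated objective: simpler
-- what changed: B replaces A's guard pass plus nine independent any(...) scans by a single fused pass over args that folds a bitmask accumulator driven by a literal bit-weight table, then tests three mask patterns at the end.
import Mathlib
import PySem

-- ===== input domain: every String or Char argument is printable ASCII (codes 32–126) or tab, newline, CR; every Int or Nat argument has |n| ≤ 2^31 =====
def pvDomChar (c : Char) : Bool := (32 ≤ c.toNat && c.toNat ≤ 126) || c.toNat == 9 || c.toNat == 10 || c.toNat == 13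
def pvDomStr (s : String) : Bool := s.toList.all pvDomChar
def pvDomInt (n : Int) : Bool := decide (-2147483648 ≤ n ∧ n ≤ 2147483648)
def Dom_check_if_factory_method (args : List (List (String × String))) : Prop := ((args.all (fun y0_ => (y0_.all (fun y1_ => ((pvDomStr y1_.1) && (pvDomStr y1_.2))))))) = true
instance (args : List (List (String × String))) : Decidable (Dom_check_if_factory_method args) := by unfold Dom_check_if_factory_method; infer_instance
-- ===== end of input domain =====

-- B replaces A's guard pass plus nine independent any(...) scans by a single fused
-- pass that folds a bitmask accumulator driven by a bit-weight table (objective: simpler).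

-- arg['type'] as an Option lookup; both programs only use it after establishing
-- the key is present, so get? is exact there.
def pvGetType (arg : List (String × String)) : Option String :=
  (PySem.Dict.mk arg).get? "type"

-- ===== PORT A =====
-- the 'for arg in args: if 'type' not in arg: return False' loop
def pvGuard : List (List (String × String)) → Bool
  | [] => true
  | arg :: rest => if (PySem.Dict.mk arg).contains "type" then pvGuard rest else false

def check_if_factory_method (args : List (List (String × String))) : Bool :=
  if pvGuard args then
    let has_opt_TO_args :=
      args.any (fun a => pvGetType a == some "c10::optional<ScalarType>") &&
      args.any (fun a => pvGetType a == some "c10::optional<Layout>") &&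
      args.any (fun a => pvGetType a == some "c10::optional<Device>") &&
      args.any (fun a => pvGetType a == some "c10::optional<bool>")
    let has_TO_args :=
      args.any (fun a => pvGetType a == some "ScalarType") &&
      args.any (fun a => pvGetType a == some "Layout") &&
      args.any (fun a => pvGetType a == some "Device") &&
      args.any (fun a => pvGetType a == some "bool")
    let has_TO_arg :=
      args.any (fun a => (pvGetType a).any (fun t => PySem.Str.isIn "TensorOptions" t))
    has_opt_TO_args || has_TO_args || has_TO_arg
  else false

-- ===== PORT B =====
-- the module-level _BIT table of Source B
def pvBIT : PySem.Dict String Nat :=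
  PySem.Dict.mk
    [("c10::optional<ScalarType>", 1), ("c10::optional<Layout>", 2),
     ("c10::optional<Device>", 4), ("c10::optional<bool>", 8),
     ("ScalarType", 16), ("Layout", 32), ("Device", 64), ("bool", 128)]

-- Source B's loop: fused guard + 'mask |= _BIT.get(t, 0)' + TensorOptions bit;
-- none = the early 'return False'
def pvMaskLoop : List (List (String × String)) → Nat → Option Nat
  | [], mask => some mask
  | arg :: rest, mask =>
    match pvGetType arg with
    | none => none
    | some t =>
      let mask1 := mask ||| pvBIT.getD t 0
      let mask2 := if PySem.Str.isIn "TensorOptions" t then mask1 ||| 256 else mask1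
      pvMaskLoop rest mask2

def check_if_factory_method_alt (args : List (List (String × String))) : Bool :=
  match pvMaskLoop args 0 with
  | none => false
  | some mask => (mask &&& 15 == 15) || (mask &&& 240 == 240) || (mask &&& 256 != 0)

-- ===== PRECONDITION & SPEC =====
def Spec_check_if_factory_method (args : List (List (String × String))) (out : Bool) : Prop := out = check_if_factory_method_alt args
instance (args : List (List (String × String))) (out : Bool) : Decidable (Spec_check_if_factory_method args out) := by unfold Spec_check_if_factory_method; infer_instance

-- ===== CLAIM =====
def Claim_equal_check_if_factory_method : Prop := ∀ (args : List (List (String × String))), Dom_check_if_factory_method args → Spec_check_if_factory_method args (check_if_factory_method args)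

-- ===== LEMMAS AND PROOFS =====

-- the mask value reachable by the loop, as a function of nine flags
def pvE (c0 c1 c2 c3 c4 c5 c6 c7 c8 : Bool) : Nat :=
  cond c0 1 0 ||| cond c1 2 0 ||| cond c2 4 0 ||| cond c3 8 0 |||
  cond c4 16 0 ||| cond c5 32 0 ||| cond c6 64 0 ||| cond c7 128 0 ||| cond c8 256 0

def pvAnyEq (args : List (List (String × String))) (s : String) : Bool :=
  args.any (fun a => pvGetType a == some s)

def pvAnyTO (args : List (List (String × String))) : Bool :=
  args.any (fun a => (pvGetType a).any (fun t => PySem.Str.isIn "TensorOptions" t))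

-- one arg's mask update, characterized on pvE
theorem pvStep (t : String) (c0 c1 c2 c3 c4 c5 c6 c7 c8 : Bool) :
    (if PySem.Str.isIn "TensorOptions" t then
      (pvE c0 c1 c2 c3 c4 c5 c6 c7 c8 ||| pvBIT.getD t 0) ||| 256
     else pvE c0 c1 c2 c3 c4 c5 c6 c7 c8 ||| pvBIT.getD t 0) =
    pvE (c0 || (t == "c10::optional<ScalarType>")) (c1 || (t == "c10::optional<Layout>"))
        (c2 || (t == "c10::optional<Device>")) (c3 || (t == "c10::optional<bool>"))
        (c4 || (t == "ScalarType")) (c5 || (t == "Layout"))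
        (c6 || (t == "Device")) (c7 || (t == "bool"))
        (c8 || PySem.Str.isIn "TensorOptions" t) := by
  by_cases h0 : t = "c10::optional<ScalarType>"
  · subst h0; revert c0 c1 c2 c3 c4 c5 c6 c7 c8; decide
  by_cases h1 : t = "c10::optional<Layout>"
  · subst h1; revert c0 c1 c2 c3 c4 c5 c6 c7 c8; decide
  by_cases h2 : t = "c10::optional<Device>"
  · subst h2; revert c0 c1 c2 c3 c4 c5 c6 c7 c8; decide
  by_cases h3 : t = "c10::optional<bool>"
  · subst h3; revert c0 c1 c2 c3 c4 c5 c6 c7 c8; decide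
  by_cases h4 : t = "ScalarType"
  · subst h4; revert c0 c1 c2 c3 c4 c5 c6 c7 c8; decide
  by_cases h5 : t = "Layout"
  · subst h5; revert c0 c1 c2 c3 c4 c5 c6 c7 c8; decide
  by_cases h6 : t = "Device"
  · subst h6; revert c0 c1 c2 c3 c4 c5 c6 c7 c8; decide
  by_cases h7 : t = "bool"
  · subst h7; revert c0 c1 c2 c3 c4 c5 c6 c7 c8; decide
  have g : pvBIT.getD t 0 = 0 := by
    simp [pvBIT, PySem.Dict.getD_eq_get?_getD, beq_iff_eq, Ne.symm h0, Ne.symm h1, Ne.symm h2, Ne.symm h3,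
      Ne.symm h4, Ne.symm h5, Ne.symm h6, Ne.symm h7, PySem.Dict.get?]
  have b0 : (t == "c10::optional<ScalarType>") = false := beq_eq_false_iff_ne.mpr h0
  have b1 : (t == "c10::optional<Layout>") = false := beq_eq_false_iff_ne.mpr h1
  have b2 : (t == "c10::optional<Device>") = false := beq_eq_false_iff_ne.mpr h2
  have b3 : (t == "c10::optional<bool>") = false := beq_eq_false_iff_ne.mpr h3
  have b4 : (t == "ScalarType") = false := beq_eq_false_iff_ne.mpr h4
  have b5 : (t == "Layout") = false := beq_eq_false_iff_ne.mpr h5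
  have b6 : (t == "Device") = false := beq_eq_false_iff_ne.mpr h6
  have b7 : (t == "bool") = false := beq_eq_false_iff_ne.mpr h7
  rw [g, b0, b1, b2, b3, b4, b5, b6, b7]
  cases hTO : PySem.Str.isIn "TensorOptions" t with
  | false => revert c0 c1 c2 c3 c4 c5 c6 c7 c8; decide
  | true => revert c0 c1 c2 c3 c4 c5 c6 c7 c8; decide

-- loop invariant: the loop ORs each arg's flags into the running pvE mask
theorem pvMaskLoop_char (args : List (List (String × String))) :
    ∀ c0 c1 c2 c3 c4 c5 c6 c7 c8 : Bool,
    pvMaskLoop args (pvE c0 c1 c2 c3 c4 c5 c6 c7 c8) =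
      if pvGuard args then
        some (pvE (c0 || pvAnyEq args "c10::optional<ScalarType>")
                  (c1 || pvAnyEq args "c10::optional<Layout>")
                  (c2 || pvAnyEq args "c10::optional<Device>")
                  (c3 || pvAnyEq args "c10::optional<bool>")
                  (c4 || pvAnyEq args "ScalarType") (c5 || pvAnyEq args "Layout")
                  (c6 || pvAnyEq args "Device") (c7 || pvAnyEq args "bool")
                  (c8 || pvAnyTO args))
      else none := by
  induction args with
  | nil =>
    intro c0 c1 c2 c3 c4 c5 c6 c7 c8
    simp [pvMaskLoop, pvGuard, pvAnyEq, pvAnyTO]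
  | cons arg rest ih =>
    intro c0 c1 c2 c3 c4 c5 c6 c7 c8
    cases ht : pvGetType arg with
    | none =>
      have hc : (PySem.Dict.mk arg).contains "type" = false := by
        rw [PySem.Dict.contains_eq_isSome_get?]
        have : (PySem.Dict.mk arg).get? "type" = none := ht
        simp [this]
      simp [pvMaskLoop, ht, pvGuard, hc]
    | some t =>
      have hc : (PySem.Dict.mk arg).contains "type" = true := by
        rw [PySem.Dict.contains_eq_isSome_get?]
        have : (PySem.Dict.mk arg).get? "type" = some t := ht
        simp [this]
      simp only [pvMaskLoop, ht, pvGuard, hc, if_true]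
      rw [pvStep, ih]
      simp [pvAnyEq, pvAnyTO, List.any_cons, ht, Bool.or_assoc]

-- the final bitmask test, decided over all nine flags
theorem pvFinal (c0 c1 c2 c3 c4 c5 c6 c7 c8 : Bool) :
    ((pvE c0 c1 c2 c3 c4 c5 c6 c7 c8 &&& 15 == 15) ||
     (pvE c0 c1 c2 c3 c4 c5 c6 c7 c8 &&& 240 == 240) ||
     (pvE c0 c1 c2 c3 c4 c5 c6 c7 c8 &&& 256 != 0)) =
    ((c0 && c1 && c2 && c3) || (c4 && c5 && c6 && c7) || c8) := by
  revert c0 c1 c2 c3 c4 c5 c6 c7 c8; decide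

-- ===== VERDICT =====
theorem check_if_factory_method_spec : Claim_equal_check_if_factory_method := by
  intro args _
  unfold Spec_check_if_factory_method check_if_factory_method check_if_factory_method_alt
  have hc := pvMaskLoop_char args false false false false false false false false false
  rw [show pvE false false false false false false false false false = 0 from rfl] at hc
  rw [hc]
  cases hg : pvGuard args with
  | false => simp
  | true =>
    simp only [if_true, Bool.false_or]
    rw [pvFinal]
    rfl
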